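-- pv_equiv track=rewrite | github.com/sorinstanila/jcodemunch-mcp | src/jcodemunch_mcp/tools/get_dependency_graph.py | _bfs
-- ===== SOURCE A (Python) =====
-- from collections import deque
--
-- def _bfs(start: str, adj: dict[str, list[str]], depth: int) -> tuple[list[str], list[list[str]]]:
--     """BFS from start up to depth hops. Returns (nodes, edges)."""
--     visited: dict[str, int] = {start: 0}  # node -> level
--     edges: list[list[str]] = []
--     queue: deque = deque([(start, 0)])
--
--     while queue:
--         node, level = queue.popleft()
--         if level >= depth:
--             continue
--         for neighbor in adj.get(node, []):
--             edges.append([node, neighbor])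
--             if neighbor not in visited:
--                 visited[neighbor] = level + 1
--                 queue.append((neighbor, level + 1))
--
--     return list(visited.keys()), edges
-- ===== SOURCE B (Python) =====
-- def _bfs(start: str, adj: dict[str, list[str]], depth: int) -> tuple[list[str], list[list[str]]]:
--     """Level-synchronous BFS from start up to depth hops. Returns (nodes, edges)."""
--     visited = {start: None}  # insertion order = discovery order
--     edges: list[list[str]] = []
--     frontier = [start]
--     for _ in range(depth):
--         if not frontier:
--             break
--         nxt: list[str] = []
--         for node in frontier:
--             for neighbor in adj.get(node, []):
--                 edges.append([node, neighbor])
--                 if neighbor not in visited: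
--                     visited[neighbor] = None
--                     nxt.append(neighbor)
--         frontier = nxt
--     return list(visited), edges
-- ===== Notes on version B (the rewrite author's own statement) =====
-- stated objective: alternative
-- what changed: Replaces the deque of (node, level) pairs and the while/continue level guard with a level-synchronous BFS: a range(depth) loop over whole frontier lists, so no per-node level is stored and no queue is maintained.
import Mathlib
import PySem

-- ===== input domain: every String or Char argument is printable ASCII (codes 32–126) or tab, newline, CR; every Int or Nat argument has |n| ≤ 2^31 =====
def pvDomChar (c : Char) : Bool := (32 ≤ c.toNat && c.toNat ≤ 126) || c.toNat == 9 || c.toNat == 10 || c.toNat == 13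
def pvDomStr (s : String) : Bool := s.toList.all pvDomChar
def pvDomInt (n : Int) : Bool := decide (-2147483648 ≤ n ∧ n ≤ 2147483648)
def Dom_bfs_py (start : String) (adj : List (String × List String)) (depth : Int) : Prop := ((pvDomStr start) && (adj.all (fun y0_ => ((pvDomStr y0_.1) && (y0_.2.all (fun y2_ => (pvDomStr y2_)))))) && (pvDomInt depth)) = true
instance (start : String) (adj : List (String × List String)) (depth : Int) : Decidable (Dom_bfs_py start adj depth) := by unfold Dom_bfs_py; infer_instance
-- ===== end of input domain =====

-- B replaces A's deque of (node, level) pairs by a level-synchronous frontier loop ('alternative' decomposition, same cost); same return value.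


-- ===== PORT A =====
-- inner 'for neighbor in adj.get(node, [])' loop body; state = (visited, queue, edges)
def bfsA_inner (node : String) (level : Int)
    (st : PySem.Dict String Int × List (String × Int) × List (List String)) (nb : String) :
    PySem.Dict String Int × List (String × Int) × List (List String) :=
  let edges := st.2.2 ++ [[node, nb]]
  if st.1.contains nb then (st.1, st.2.1, edges)
  else (st.1.insert nb (level + 1), st.2.1 ++ [(nb, level + 1)], edges)

-- the 'while queue' loop; fuel is only a totality guard (the loop pops at most
-- 1 + (number of neighbour occurrences) entries, which is the fuel bfs_py passes)
def bfsA_loop (adj : PySem.Dict String (List String)) (depth : Int) :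
    Nat → List (String × Int) → PySem.Dict String Int → List (List String) →
    List String × List (List String)
  | 0, _, visited, edges => (visited.keys, edges)
  | _ + 1, [], visited, edges => (visited.keys, edges)
  | fuel + 1, (node, level) :: q, visited, edges =>
    if level ≥ depth then bfsA_loop adj depth fuel q visited edges
    else
      let st := (adj.getD node []).foldl (bfsA_inner node level) (visited, q, edges)
      bfsA_loop adj depth fuel st.2.1 st.1 st.2.2

def bfs_py (start : String) (adj : List (String × List String)) (depth : Int) :
    List String × List (List String) :=
  let adjd := PySem.Dict.ofList adj
  bfsA_loop adjd depth (1 + adjd.values.flatten.length)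
    [(start, 0)] (PySem.Dict.empty.insert start 0) []

-- ===== PORT B =====
-- one frontier node: 'for neighbor in adj.get(node, [])'; state = (visited, edges, nxt)
def bfsB_node (adj : PySem.Dict String (List String)) (node : String)
    (st : PySem.Dict String Unit × List (List String) × List String) :
    PySem.Dict String Unit × List (List String) × List String :=
  (adj.getD node []).foldl (fun st nb =>
    let edges := st.2.1 ++ [[node, nb]]
    if st.1.contains nb then (st.1, edges, st.2.2)
    else (st.1.insert nb (), edges, st.2.2 ++ [nb])) st

-- 'for _ in range(depth): if not frontier: break; …'
def bfsB_loop (adj : PySem.Dict String (List String)) :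
    Nat → List String → PySem.Dict String Unit → List (List String) →
    List String × List (List String)
  | 0, _, visited, edges => (visited.keys, edges)
  | r + 1, frontier, visited, edges =>
    if frontier = [] then (visited.keys, edges)
    else
      let st := frontier.foldl (fun st node => bfsB_node adj node st) (visited, edges, [])
      bfsB_loop adj r st.2.2 st.1 st.2.1

def bfs_py_alt (start : String) (adj : List (String × List String)) (depth : Int) :
    List String × List (List String) :=
  let adjd := PySem.Dict.ofList adj
  bfsB_loop adjd depth.toNat [start] (PySem.Dict.empty.insert start ()) []

-- ===== PRECONDITION & SPEC =====
def Spec_bfs_py (start : String) (adj : List (String × List String)) (depth : Int) (out : List String × List (List String)) : Prop := out = bfs_py_alt start adj depth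
instance (start : String) (adj : List (String × List String)) (depth : Int) (out : List String × List (List String)) : Decidable (Spec_bfs_py start adj depth out) := by unfold Spec_bfs_py; infer_instance

-- ===== CLAIM (what is proved, stated in full; the proofs are below) =====
def Claim_equal_bfs_py : Prop := ∀ (start : String) (adj : List (String × List String)) (depth : Int), Dom_bfs_py start adj depth → Spec_bfs_py start adj depth (bfs_py start adj depth)

-- ===== LEMMAS AND PROOFS =====

-- the nodes of l that are fresh w.r.t. the key set V, in order, without repetition
def freshIns (V : List String) : List String → List String
  | [] => []
  | nb :: l => if nb ∈ V then freshIns V l else nb :: freshIns (V ++ [nb]) l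

-- dict evolution of one inner loop (A side, values = levels)
def dInsA (level : Int) (V : PySem.Dict String Int) : List String → PySem.Dict String Int
  | [] => V
  | nb :: l => dInsA level (if V.contains nb then V else V.insert nb (level + 1)) l

-- dict evolution of one inner loop (B side, values = unit)
def dInsB (V : PySem.Dict String Unit) : List String → PySem.Dict String Unit
  | [] => V
  | nb :: l => dInsB (if V.contains nb then V else V.insert nb ()) l

theorem freshIns_sub (l : List String) : ∀ V, freshIns V l ⊆ l := by
  induction l with
  | nil => intro V; simp [freshIns]
  | cons nb l ih =>
    intro V
    simp only [freshIns]
    split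
    · exact (ih V).trans (List.subset_cons_self _ _)
    · exact List.cons_subset_cons _ (ih _)

theorem freshIns_fresh (l : List String) : ∀ V x, x ∈ freshIns V l → x ∉ V := by
  induction l with
  | nil => intro V x h; simp [freshIns] at h
  | cons nb l ih =>
    intro V x h
    simp only [freshIns] at h
    split at h
    · exact ih V x h
    · rcases List.mem_cons.1 h with rfl | h
      · assumption
      · have := ih _ x h; intro hx; exact this (List.mem_append_left _ hx)

theorem freshIns_nodup (l : List String) : ∀ V, (freshIns V l).Nodup := by
  induction l with
  | nil => intro V; simp [freshIns]
  | cons nb l ih =>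
    intro V
    simp only [freshIns]
    split
    · exact ih V
    · refine List.nodup_cons.2 ⟨fun h => ?_, ih _⟩
      exact freshIns_fresh l _ nb h (List.mem_append_right _ (List.mem_singleton.2 rfl))

theorem keys_dInsA (level : Int) (l : List String) :
    ∀ V : PySem.Dict String Int, (dInsA level V l).keys = V.keys ++ freshIns V.keys l := by
  induction l with
  | nil => intro V; simp [dInsA, freshIns]
  | cons nb l ih =>
    intro V
    simp only [dInsA, freshIns]
    by_cases h : nb ∈ V.keys
    · rw [if_pos, if_pos h, ih]
      rw [PySem.Dict.contains_eq_decide_mem_keys]; simp [h]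
    · have hc : V.contains nb = false := by
        rw [PySem.Dict.contains_eq_decide_mem_keys]; simp [h]
      rw [if_neg (by simp [hc]), if_neg h, ih,
        PySem.Dict.keys_insert_of_not_contains _ _ hc]
      simp

theorem keys_dInsB (l : List String) :
    ∀ V : PySem.Dict String Unit, (dInsB V l).keys = V.keys ++ freshIns V.keys l := by
  induction l with
  | nil => intro V; simp [dInsB, freshIns]
  | cons nb l ih =>
    intro V
    simp only [dInsB, freshIns]
    by_cases h : nb ∈ V.keys
    · rw [if_pos, if_pos h, ih]
      rw [PySem.Dict.contains_eq_decide_mem_keys]; simp [h]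
    · have hc : V.contains nb = false := by
        rw [PySem.Dict.contains_eq_decide_mem_keys]; simp [h]
      rw [if_neg (by simp [hc]), if_neg h, ih,
        PySem.Dict.keys_insert_of_not_contains _ _ hc]
      simp

-- A's inner fold, fully characterised
theorem A_fold (node : String) (level : Int) (l : List String) :
    ∀ (V : PySem.Dict String Int) (q : List (String × Int)) (E : List (List String)),
    l.foldl (bfsA_inner node level) (V, q, E) =
      (dInsA level V l,
       q ++ (freshIns V.keys l).map (fun n => (n, level + 1)),
       E ++ l.map (fun nb => [node, nb])) := by
  induction l with
  | nil => intro V q E; simp [dInsA, freshIns]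
  | cons nb l ih =>
    intro V q E
    simp only [List.foldl_cons, bfsA_inner, dInsA, freshIns]
    by_cases h : nb ∈ V.keys
    · have hc : V.contains nb = true := by
        rw [PySem.Dict.contains_eq_decide_mem_keys]; simp [h]
      rw [if_pos h, hc]
      simp only [ite_true, ih]
      simp
    · have hc : V.contains nb = false := by
        rw [PySem.Dict.contains_eq_decide_mem_keys]; simp [h]
      rw [if_neg h, hc]
      simp only [Bool.false_eq_true, ite_false, ih]
      rw [PySem.Dict.keys_insert_of_not_contains _ _ hc]
      simp

-- B's inner fold, fully characterised
theorem B_fold (adjd : PySem.Dict String (List String)) (node : String) :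
    ∀ (V : PySem.Dict String Unit) (E : List (List String)) (nxt : List String),
    bfsB_node adjd node (V, E, nxt) =
      (dInsB V (adjd.getD node []),
       E ++ (adjd.getD node []).map (fun nb => [node, nb]),
       nxt ++ freshIns V.keys (adjd.getD node [])) := by
  have main : ∀ (l : List String) (V : PySem.Dict String Unit) E nxt,
      l.foldl (fun st nb =>
        let edges := st.2.1 ++ [[node, nb]]
        if st.1.contains nb then (st.1, edges, st.2.2)
        else (st.1.insert nb (), edges, st.2.2 ++ [nb])) (V, E, nxt) =
      (dInsB V l, E ++ l.map (fun nb => [node, nb]), nxt ++ freshIns V.keys l) := by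
    intro l
    induction l with
    | nil => intro V E nxt; simp [dInsB, freshIns]
    | cons nb l ih =>
      intro V E nxt
      simp only [List.foldl_cons, dInsB, freshIns]
      by_cases h : nb ∈ V.keys
      · have hc : V.contains nb = true := by
          rw [PySem.Dict.contains_eq_decide_mem_keys]; simp [h]
        rw [if_pos h, hc]
        simp only [ite_true, ih]
        simp
      · have hc : V.contains nb = false := by
          rw [PySem.Dict.contains_eq_decide_mem_keys]; simp [h]
        rw [if_neg h, hc]
        simp only [Bool.false_eq_true, ite_false, ih]
        rw [PySem.Dict.keys_insert_of_not_contains _ _ hc]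
        simp
  intro V E nxt
  exact main _ V E nxt

-- getD of the adjacency dict is contained in its flattened values
theorem getD_sub_values (adjd : PySem.Dict String (List String)) (node : String) :
    ∀ x ∈ adjd.getD node [], x ∈ adjd.values.flatten := by
  intro x hx
  rcases h : adjd.get? node with _ | l
  · rw [PySem.Dict.getD_eq_get?_getD, h] at hx; simp at hx
  · rw [PySem.Dict.getD_eq_get?_getD, h] at hx
    simp only [Option.getD_some] at hx
    have : (node, l) ∈ adjd.items := PySem.Dict.mem_items_of_get?_eq_some _ h
    have hl : l ∈ adjd.values := by
      simp only [PySem.Dict.values]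
      exact List.mem_map.2 ⟨(node, l), this, rfl⟩
    exact List.mem_flatten.2 ⟨l, hl, hx⟩

-- remaining budget: distinct neighbour occurrences not yet visited
def remCount (adjd : PySem.Dict String (List String)) (V : List String) : Nat :=
  (adjd.values.flatten.dedup.filter (fun x => x ∉ V)).length

theorem remCount_append (adjd : PySem.Dict String (List String)) (V Δ : List String)
    (hΔsub : ∀ x ∈ Δ, x ∈ adjd.values.flatten) (hΔnd : Δ.Nodup)
    (hΔfresh : ∀ x ∈ Δ, x ∉ V) :
    remCount adjd V = Δ.length + remCount adjd (V ++ Δ) := by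
  classical
  unfold remCount
  have hDnd : adjd.values.flatten.dedup.Nodup := List.nodup_dedup _
  have h1 : ((adjd.values.flatten.dedup.filter (fun x => decide (x ∉ V))).filter
        (fun x => decide (x ∈ Δ)) ++
      (adjd.values.flatten.dedup.filter (fun x => decide (x ∉ V))).filter
        (fun x => !decide (x ∈ Δ))).length =
      (adjd.values.flatten.dedup.filter (fun x => decide (x ∉ V))).length :=
    (List.filter_append_perm _ _).length_eq
  rw [List.length_append] at h1
  have h2 : (adjd.values.flatten.dedup.filter (fun x => decide (x ∉ V))).filter
      (fun x => decide (x ∈ Δ)) |>.Perm Δ := by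
    apply (List.perm_ext_iff_of_nodup (List.Nodup.filter _ (List.Nodup.filter _ hDnd)) hΔnd).2
    intro a
    simp only [List.mem_filter, decide_eq_true_eq]
    constructor
    · rintro ⟨⟨-, -⟩, ha⟩; exact ha
    · intro ha
      exact ⟨⟨List.mem_dedup.2 (hΔsub a ha), hΔfresh a ha⟩, ha⟩
  have h3 : (adjd.values.flatten.dedup.filter (fun x => decide (x ∉ V))).filter
      (fun x => !decide (x ∈ Δ)) =
      adjd.values.flatten.dedup.filter (fun x => decide (x ∉ V ++ Δ)) := by
    rw [List.filter_filter]
    congr 1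
    funext x
    by_cases hv : x ∈ V <;> by_cases hd : x ∈ Δ <;> simp [hv, hd]
  rw [← h1, h2.length_eq, h3]

-- loop on the empty queue returns immediately, whatever the fuel
theorem loopA_nil (adjd : PySem.Dict String (List String)) (depth : Int) (fuel : Nat)
    (V : PySem.Dict String Int) (E : List (List String)) :
    bfsA_loop adjd depth fuel [] V E = (V.keys, E) := by
  cases fuel <;> rfl

-- all entries at level ≥ depth are skipped
theorem loopA_skip (adjd : PySem.Dict String (List String)) (depth : Int) :
    ∀ (q : List (String × Int)) (fuel : Nat) (V : PySem.Dict String Int) E,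
    (∀ p ∈ q, p.2 ≥ depth) → q.length ≤ fuel →
    bfsA_loop adjd depth fuel q V E = (V.keys, E) := by
  intro q
  induction q with
  | nil => intro fuel V E _ _; exact loopA_nil _ _ _ _ _
  | cons p q ih =>
    intro fuel V E hq hf
    obtain ⟨node, level⟩ := p
    cases fuel with
    | zero => simp at hf
    | succ f =>
      have hge : level ≥ depth := hq (node, level) (List.mem_cons_self)
      simp only [bfsA_loop, if_pos hge]
      exact ih f V E (fun p hp => hq p (List.mem_cons_of_mem _ hp)) (by simpa using hf)

-- one whole level of A equals one iteration of B's frontier fold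
theorem level_step (adjd : PySem.Dict String (List String)) (depth level : Int)
    (hlt : level < depth) :
    ∀ (cur : List String) (fuel : Nat) (nxt : List String)
      (VA : PySem.Dict String Int) (VB : PySem.Dict String Unit) (E : List (List String)),
    VA.keys = VB.keys →
    ∃ Δ : List String,
      (cur.foldl (fun st node => bfsB_node adjd node st) (VB, E, nxt)).2.2 = nxt ++ Δ ∧
      (cur.foldl (fun st node => bfsB_node adjd node st) (VB, E, nxt)).2.1 =
        E ++ cur.flatMap (fun node => (adjd.getD node []).map (fun nb => [node, nb])) ∧
      (cur.foldl (fun st node => bfsB_node adjd node st) (VB, E, nxt)).1.keys = VB.keys ++ Δ ∧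
      (∃ VA' : PySem.Dict String Int, VA'.keys = VA.keys ++ Δ ∧
        bfsA_loop adjd depth (fuel + cur.length)
          (cur.map (fun n => (n, level)) ++ nxt.map (fun n => (n, level + 1))) VA E =
        bfsA_loop adjd depth fuel ((nxt ++ Δ).map (fun n => (n, level + 1))) VA'
          (E ++ cur.flatMap (fun node => (adjd.getD node []).map (fun nb => [node, nb])))) ∧
      Δ.Nodup ∧ (∀ x ∈ Δ, x ∈ adjd.values.flatten) ∧ (∀ x ∈ Δ, x ∉ VA.keys) := by
  intro cur
  induction cur with
  | nil =>
    intro fuel nxt VA VB E hk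
    exact ⟨[], by simp, by simp, by simp, ⟨VA, by simp, by simp⟩, by simp, by simp, by simp⟩
  | cons node cur ih =>
    intro fuel nxt VA VB E hk
    -- process node on both sides
    have hA := A_fold node level (adjd.getD node []) VA
      (cur.map (fun n => (n, level)) ++ nxt.map (fun n => (n, level + 1))) E
    have hB := B_fold adjd node VB E nxt
    have hFB : freshIns VB.keys (adjd.getD node []) = freshIns VA.keys (adjd.getD node []) := by
      rw [hk]
    rw [hFB] at hB
    -- after processing node: A dict dInsA, B dict dInsB, frontiers extended by the fresh nodes
    have hkeysA : (dInsA level VA (adjd.getD node [])).keys =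
        VA.keys ++ freshIns VA.keys (adjd.getD node []) := keys_dInsA level _ VA
    have hkeysB : (dInsB VB (adjd.getD node [])).keys =
        VB.keys ++ freshIns VA.keys (adjd.getD node []) := by rw [keys_dInsB, hk]
    have hk' : (dInsA level VA (adjd.getD node [])).keys =
        (dInsB VB (adjd.getD node [])).keys := by rw [hkeysA, hkeysB, hk]
    obtain ⟨Δ', h1, h2, h3, ⟨VA', hVA', h4⟩, h5, h6, h7⟩ :=
      ih fuel (nxt ++ freshIns VA.keys (adjd.getD node [])) (dInsA level VA (adjd.getD node []))
        (dInsB VB (adjd.getD node []))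
        (E ++ (adjd.getD node []).map (fun nb => [node, nb])) hk'
    refine ⟨freshIns VA.keys (adjd.getD node []) ++ Δ', ?_, ?_, ?_, ⟨VA', ?_, ?_⟩, ?_, ?_, ?_⟩
    · simp only [List.foldl_cons, hB, h1, List.append_assoc]
    · simp only [List.foldl_cons, hB, h2, List.flatMap_cons, List.append_assoc]
    · simp only [List.foldl_cons, hB, h3, hkeysB, List.append_assoc]
    · rw [hVA', hkeysA, List.append_assoc]
    · -- A loop steps through node then the rest of the level
      have hfc : fuel + (node :: cur).length = (fuel + cur.length) + 1 := by
        simp only [List.length_cons]; omega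
      rw [hfc]
      show bfsA_loop adjd depth ((fuel + cur.length) + 1)
          ((node, level) :: (cur.map (fun n => (n, level)) ++ nxt.map (fun n => (n, level + 1)))) VA E = _
      simp only [bfsA_loop, if_neg (not_le.2 hlt)]
      rw [hA]
      have hq : (cur.map (fun n => (n, level)) ++ nxt.map (fun n => (n, level + 1))) ++
          (freshIns VA.keys (adjd.getD node [])).map (fun n => (n, level + 1)) =
          cur.map (fun n => (n, level)) ++
            (nxt ++ freshIns VA.keys (adjd.getD node [])).map (fun n => (n, level + 1)) := by
        simp
      rw [hq, h4]
      simp [List.flatMap_cons, List.append_assoc]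
    · -- nodup
      refine List.Nodup.append (freshIns_nodup _ _) h5 ?_
      intro x hxF hxΔ'
      exact h7 x hxΔ' (by rw [hkeysA]; exact List.mem_append_right _ hxF)
    · intro x hx
      rcases List.mem_append.1 hx with hx | hx
      · exact getD_sub_values adjd node x (freshIns_sub _ VA.keys hx)
      · exact h6 x hx
    · intro x hx
      rcases List.mem_append.1 hx with hx | hx
      · exact freshIns_fresh _ _ x hx
      · intro hxV; exact h7 x hx (by rw [hkeysA]; exact List.mem_append_left _ hxV)

-- main correspondence: A's queue loop at level depth - r = B's loop with r rounds left
theorem outer (adjd : PySem.Dict String (List String)) (depth : Int) :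
    ∀ (r : Nat) (level : Int) (cur : List String) (fuel : Nat)
      (VA : PySem.Dict String Int) (VB : PySem.Dict String Unit) (E : List (List String)),
    VA.keys = VB.keys →
    (0 < r → level = depth - r) → (depth ≤ level + r) →
    cur.length + remCount adjd VA.keys ≤ fuel →
    bfsA_loop adjd depth fuel (cur.map (fun n => (n, level))) VA E =
      bfsB_loop adjd r cur VB E := by
  intro r
  induction r with
  | zero =>
    intro level cur fuel VA VB E hk _ hge hf
    have : bfsA_loop adjd depth fuel (cur.map (fun n => (n, level))) VA E = (VA.keys, E) := by
      apply loopA_skip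
      · intro p hp
        rcases List.mem_map.1 hp with ⟨n, _, rfl⟩
        simpa using hge
      · simpa using le_trans (Nat.le_add_right _ _) hf
    rw [this, hk]; rfl
  | succ r ih =>
    intro level cur fuel VA VB E hk h0 hge hf
    have hlevel : level = depth - (r + 1 : Nat) := h0 (Nat.succ_pos r)
    have hlt : level < depth := by rw [hlevel]; push_cast; omega
    cases cur with
    | nil =>
      simp only [List.map_nil, loopA_nil]
      rw [hk]; rfl
    | cons c cur0 =>
      set cur := c :: cur0 with hcur
      have hfc : cur.length ≤ fuel := le_trans (Nat.le_add_right _ _) hf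
      obtain ⟨Δ, h1, h2, h3, ⟨VA', hVA', h4⟩, h5, h6, h7⟩ :=
        level_step adjd depth level hlt cur (fuel - cur.length) [] VA VB E hk
      have hfuel_eq : (fuel - cur.length) + cur.length = fuel := Nat.sub_add_cancel hfc
      have h4' : bfsA_loop adjd depth fuel (cur.map (fun n => (n, level))) VA E =
          bfsA_loop adjd depth (fuel - cur.length) (Δ.map (fun n => (n, level + 1))) VA'
            (E ++ cur.flatMap (fun node => (adjd.getD node []).map (fun nb => [node, nb]))) := by
        have := h4
        rw [hfuel_eq] at this
        simpa using this
      rw [h4']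
      have hrem : remCount adjd VA.keys = Δ.length + remCount adjd (VA.keys ++ Δ) :=
        remCount_append adjd VA.keys Δ h6 h5 h7
      have hstep : bfsB_loop adjd (r + 1) cur VB E =
          bfsB_loop adjd r
            ((cur.foldl (fun st node => bfsB_node adjd node st) (VB, E, [])).2.2)
            ((cur.foldl (fun st node => bfsB_node adjd node st) (VB, E, [])).1)
            ((cur.foldl (fun st node => bfsB_node adjd node st) (VB, E, [])).2.1) := by
        rw [hcur]
        simp only [bfsB_loop]
        rw [if_neg (by simp)]
      rw [hstep, h1, h2]
      simp only [List.nil_append]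
      apply ih (level + 1) Δ (fuel - cur.length) VA' _ _ _ _ _ _
      · rw [hVA', h3, hk]
      · intro hr; rw [hlevel]; push_cast; omega
      · rw [hlevel]; push_cast; omega
      · rw [hVA', ← hrem]; omega

-- ===== VERDICT (by name: the statement is the Claim_ definition above) =====
theorem bfs_py_spec : Claim_equal_bfs_py := by
  intro start adj depth _
  show bfs_py start adj depth = bfs_py_alt start adj depth
  unfold bfs_py bfs_py_alt
  set adjd := PySem.Dict.ofList adj with hadjd
  have hkeys : (PySem.Dict.empty.insert start (0 : Int)).keys =
      ((PySem.Dict.empty (κ := String) (ν := Unit)).insert start ()).keys := by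
    rw [PySem.Dict.keys_insert_of_not_contains _ _ (PySem.Dict.contains_empty _),
      PySem.Dict.keys_insert_of_not_contains _ _ (PySem.Dict.contains_empty _)]
    rfl
  have hq : [(start, (0 : Int))] = [start].map (fun n => (n, (0 : Int))) := rfl
  rw [hq]
  apply outer adjd depth depth.toNat 0 [start] _ _ _ _ hkeys
  · intro h
    omega
  · omega
  · -- fuel: 1 + all neighbour occurrences ≥ 1 + remCount
    have h1 : remCount adjd (PySem.Dict.empty.insert start (0:Int)).keys ≤
        adjd.values.flatten.length := by
      calc remCount adjd _ ≤ adjd.values.flatten.dedup.length :=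
              List.length_filter_le _ _
        _ ≤ adjd.values.flatten.length := (List.dedup_sublist _).length_le
    simp only [List.length_cons, List.length_nil]
    omega
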